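-- pv_equiv track=rewrite | github.com/Lundalogik/plugin_objektvision | plugin_objektvision/objektvision_estate_factory.py | get_premise_type
-- ===== SOURCE A (Python) =====
-- def get_premise_type(premise_types_from_lime):
--     premise_type_to_ov = []
--     for type in premise_types_from_lime:
--         if 'office' in type.lower():
--             premise_type_to_ov.append('Office')
--         elif 'shop' in type.lower():
--             premise_type_to_ov.append('Shop')
--         elif 'storage' in type.lower():
--             premise_type_to_ov.append('Storage')
--         elif 'industry' in type.lower():
--             premise_type_to_ov.append('Industry')
--         elif 'officehotel' in type.lower():
--             premise_type_to_ov.append('Officehotel')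
--         elif 'other' in type.lower():
--             premise_type_to_ov.append('Other')
--         else:
--             premise_type_to_ov.append('Other')
--
--     return {'PremiseTypes': premise_type_to_ov}
-- ===== SOURCE B (Python) =====
-- def get_premise_type(premise_types_from_lime):
--     # Rule-major staged passes: start with all 'Other', then sweep the list once per
--     # keyword in increasing priority, overwriting matches; the final overwrite wins,
--     # so each slot ends with its highest-priority matching label ('office' highest).
--     # A's 'officehotel' branch is unreachable ('office' matches first) and its
--     # 'other' branch coincides with the default, so four rules suffice.
--     lowered = [t.lower() for t in premise_types_from_lime]
--     result = ['Other'] * len(lowered)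
--     for kw, label in [('industry', 'Industry'), ('storage', 'Storage'),
--                       ('shop', 'Shop'), ('office', 'Office')]:
--         for i, tl in enumerate(lowered):
--             if kw in tl:
--                 result[i] = label
--     return {'PremiseTypes': result}
-- ===== Notes on version B (the rewrite author's own statement) =====
-- stated objective: alternative
-- what changed: Inverts the traversal: instead of a per-element elif chain, B makes one staged pass over the whole list per keyword in increasing priority, overwriting a preinitialised 'Other' array so the last (highest-priority) overwrite wins; the unreachable 'officehotel' and redundant 'other' branches disappear.
import Mathlib
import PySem

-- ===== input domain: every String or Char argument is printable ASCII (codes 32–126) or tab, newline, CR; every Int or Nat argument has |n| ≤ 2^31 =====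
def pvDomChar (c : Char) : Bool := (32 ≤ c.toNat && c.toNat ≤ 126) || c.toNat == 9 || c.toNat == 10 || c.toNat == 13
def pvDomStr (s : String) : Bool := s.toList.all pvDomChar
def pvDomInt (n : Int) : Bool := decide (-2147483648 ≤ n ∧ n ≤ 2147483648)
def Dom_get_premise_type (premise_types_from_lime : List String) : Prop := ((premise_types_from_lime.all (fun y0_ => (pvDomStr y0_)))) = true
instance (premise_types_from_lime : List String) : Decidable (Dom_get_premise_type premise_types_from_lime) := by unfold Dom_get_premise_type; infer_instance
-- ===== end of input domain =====

-- B inverts the traversal: rule-major staged passes overwriting a preinitialised 'Other' list,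
-- highest-priority keyword swept last so its overwrite wins (alternative decomposition, same cost).

-- ===== PORT A =====
def get_premise_type (premise_types_from_lime : List String) : List (String × List String) :=
  let premise_type_to_ov :=
    premise_types_from_lime.foldl (fun acc type =>
      if PySem.Str.isIn "office" (PySem.Str.lower type) then acc ++ ["Office"]
      else if PySem.Str.isIn "shop" (PySem.Str.lower type) then acc ++ ["Shop"]
      else if PySem.Str.isIn "storage" (PySem.Str.lower type) then acc ++ ["Storage"]
      else if PySem.Str.isIn "industry" (PySem.Str.lower type) then acc ++ ["Industry"]
      else if PySem.Str.isIn "officehotel" (PySem.Str.lower type) then acc ++ ["Officehotel"]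
      else if PySem.Str.isIn "other" (PySem.Str.lower type) then acc ++ ["Other"]
      else acc ++ ["Other"]) []
  [("PremiseTypes", premise_type_to_ov)]

-- ===== PORT B =====
-- one staged pass: overwrite result[i] with label wherever kw occurs in lowered[i]
def pvSweep (kw label : String) (result lowered : List String) : List String :=
  (result.zip lowered).map (fun p => if PySem.Str.isIn kw p.2 then label else p.1)

def get_premise_type_alt (premise_types_from_lime : List String) : List (String × List String) :=
  let lowered := premise_types_from_lime.map PySem.Str.lower
  let result := List.replicate lowered.length "Other"
  let result :=
    [("industry", "Industry"), ("storage", "Storage"), ("shop", "Shop"), ("office", "Office")].foldl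
      (fun res (rule : String × String) => pvSweep rule.1 rule.2 res lowered) result
  [("PremiseTypes", result)]

-- ===== PRECONDITION & SPEC =====
def Spec_get_premise_type (premise_types_from_lime : List String) (out : List (String × List String)) : Prop := out = get_premise_type_alt premise_types_from_lime
instance (premise_types_from_lime : List String) (out : List (String × List String)) : Decidable (Spec_get_premise_type premise_types_from_lime out) := by unfold Spec_get_premise_type; infer_instance

-- ===== CLAIM =====
def Claim_equal_get_premise_type : Prop := ∀ (premise_types_from_lime : List String), Dom_get_premise_type premise_types_from_lime → Spec_get_premise_type premise_types_from_lime (get_premise_type premise_types_from_lime)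

-- ===== LEMMAS AND PROOFS =====

-- 'officehotel' in l implies 'office' in l, so A's fifth branch never fires.
theorem pv_office_of_officehotel (l : String)
    (h : PySem.Str.isIn "officehotel" l = true) : PySem.Str.isIn "office" l = true := by
  simp only [PySem.Str.isIn_eq] at h ⊢
  rw [PySem.Chars.isIn_iff_infix] at h ⊢
  exact List.IsInfix.trans (by decide) h

theorem pv_replicate_eq_map (l : List String) :
    List.replicate l.length "Other" = l.map (fun _ => "Other") := by
  induction l with
  | nil => rfl
  | cons x xs ih => rw [List.length_cons, List.replicate_succ, List.map_cons, ih]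

-- a sweep over a mapped result list maps the per-element update
theorem pv_sweep_map (kw label : String) (g : String → String) (l : List String) :
    pvSweep kw label (l.map g) l
      = l.map (fun tl => if PySem.Str.isIn kw tl then label else g tl) := by
  induction l with
  | nil => rfl
  | cons x xs ih =>
      simp only [pvSweep, List.map_cons, List.zip_cons_cons] at ih ⊢
      rw [ih]

-- Per-element agreement of A's branch chain with B's overwrite cascade.
theorem pv_elem_eq (t : String) :
    (if PySem.Str.isIn "office" (PySem.Str.lower t) then "Office"
     else if PySem.Str.isIn "shop" (PySem.Str.lower t) then "Shop"
     else if PySem.Str.isIn "storage" (PySem.Str.lower t) then "Storage"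
     else if PySem.Str.isIn "industry" (PySem.Str.lower t) then "Industry"
     else if PySem.Str.isIn "officehotel" (PySem.Str.lower t) then "Officehotel"
     else if PySem.Str.isIn "other" (PySem.Str.lower t) then "Other"
     else "Other")
    = (if PySem.Str.isIn "office" (PySem.Str.lower t) then "Office"
       else if PySem.Str.isIn "shop" (PySem.Str.lower t) then "Shop"
       else if PySem.Str.isIn "storage" (PySem.Str.lower t) then "Storage"
       else if PySem.Str.isIn "industry" (PySem.Str.lower t) then "Industry"
       else "Other") := by
  split_ifs with h1 h2 h3 h4 h5 h6 <;> try rfl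
  exact absurd (pv_office_of_officehotel _ h5) h1

-- ===== VERDICT =====
theorem get_premise_type_spec : Claim_equal_get_premise_type := by
  intro xs _
  unfold Spec_get_premise_type get_premise_type get_premise_type_alt
  simp only [List.foldl]
  rw [show (fun acc type =>
      if PySem.Str.isIn "office" (PySem.Str.lower type) then acc ++ ["Office"]
      else if PySem.Str.isIn "shop" (PySem.Str.lower type) then acc ++ ["Shop"]
      else if PySem.Str.isIn "storage" (PySem.Str.lower type) then acc ++ ["Storage"]
      else if PySem.Str.isIn "industry" (PySem.Str.lower type) then acc ++ ["Industry"]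
      else if PySem.Str.isIn "officehotel" (PySem.Str.lower type) then acc ++ ["Officehotel"]
      else if PySem.Str.isIn "other" (PySem.Str.lower type) then acc ++ ["Other"]
      else acc ++ ["Other"]) = (fun (acc : List String) type => acc ++
        [if PySem.Str.isIn "office" (PySem.Str.lower type) then "Office"
         else if PySem.Str.isIn "shop" (PySem.Str.lower type) then "Shop"
         else if PySem.Str.isIn "storage" (PySem.Str.lower type) then "Storage"
         else if PySem.Str.isIn "industry" (PySem.Str.lower type) then "Industry"
         else if PySem.Str.isIn "officehotel" (PySem.Str.lower type) then "Officehotel"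
         else if PySem.Str.isIn "other" (PySem.Str.lower type) then "Other"
         else "Other"]) from by funext acc t; split_ifs <;> rfl]
  rw [PySem.List.foldl_append_singleton_eq_map, List.nil_append]
  have hlen : List.replicate (xs.map PySem.Str.lower).length "Other"
      = (xs.map PySem.Str.lower).map (fun _ => "Other") := pv_replicate_eq_map _
  rw [hlen, pv_sweep_map, pv_sweep_map, pv_sweep_map, pv_sweep_map, List.map_map]
  exact congrArg (fun l => [("PremiseTypes", l)])
    (List.map_congr_left (fun t _ => by simpa using pv_elem_eq t))
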